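-- pv_equiv track=rewrite | github.com/pc5401/my_BOJ | 백준/Silver/2910. 빈도 정렬/빈도 정렬.py | solve
-- ===== SOURCE A (Python) =====
-- def solve(N: int, C: int, numbers: list[int]) -> list[int]:
--     datas = dict()
--     rank = 0
--     for num in numbers:
--         if datas.get(num):
--             datas[num][0] += 1
--         else:
--             datas[num] = [1, rank]
--             rank += 1
--
--     result_datas = [(items[0], items[1], key) for key, items in datas.items()]
--     result_datas.sort(key=lambda x : (-x[0], x[1]))
--
--     rtn = []
--     for cnt, rank, num in result_datas:
--         for _ in range(cnt):
--             rtn.append(num)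
--
--     return rtn
-- ===== SOURCE B (Python) =====
-- def solve(N: int, C: int, numbers: list[int]) -> list[int]:
--     counts = {}
--     order = []
--     for num in numbers:
--         if num in counts:
--             counts[num] += 1
--         else:
--             counts[num] = 1
--             order.append(num)
--     m = len(numbers)
--     buckets = [[] for _ in range(m + 1)]
--     for num in order:
--         buckets[counts[num]].append(num)
--     out = []
--     for c in range(m, 0, -1):
--         for num in buckets[c]:
--             out.extend([num] * c)
--     return out
-- ===== Notes on version B (the rewrite author's own statement) =====
-- stated objective: faster
-- what changed: Replaces A's rank-tracking dict plus comparison sort on the tuple key (-count, rank) by a counting pass and a bucket sort on frequency (buckets filled in first-appearance order, emitted from highest count down), removing the sort entirely.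
import Mathlib
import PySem

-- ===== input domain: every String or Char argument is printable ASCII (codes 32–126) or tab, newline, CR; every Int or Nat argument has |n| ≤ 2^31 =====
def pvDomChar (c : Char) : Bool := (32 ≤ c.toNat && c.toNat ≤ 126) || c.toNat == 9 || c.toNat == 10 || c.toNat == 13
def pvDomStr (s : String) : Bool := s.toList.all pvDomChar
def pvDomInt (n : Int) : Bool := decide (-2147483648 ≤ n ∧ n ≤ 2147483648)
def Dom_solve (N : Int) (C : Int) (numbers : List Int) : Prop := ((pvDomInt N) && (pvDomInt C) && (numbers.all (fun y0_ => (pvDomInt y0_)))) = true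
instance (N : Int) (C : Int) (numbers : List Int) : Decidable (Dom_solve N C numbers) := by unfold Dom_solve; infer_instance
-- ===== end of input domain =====

-- B replaces A's comparison sort (key = (-count, first-appearance rank)) by a counting/bucket
-- sort on frequency; objective: faster (O(n log n) sort removed; both loops linear in n).

-- ===== PORT A =====
def solve (N : Int) (C : Int) (numbers : List Int) : List Int :=
  let st := numbers.foldl (fun (st : PySem.Dict Int (Int × Int) × Int) num =>
    match (st.1).get? num with
    | some cr => (st.1.insert num (cr.1 + 1, cr.2), st.2)
    | none => (st.1.insert num (1, st.2), st.2 + 1)) (PySem.Dict.empty, 0)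
  let result_datas := st.1.items.map (fun kv => (kv.2.1, kv.2.2, kv.1))
  let sortedL := PySem.List.sorted2 result_datas (fun x => -x.1) (fun x => x.2.1)
  sortedL.foldl (fun rtn t => (PySem.List.pyRange 0 t.1 1).foldl (fun r _ => r ++ [t.2.2]) rtn) []

-- ===== PORT B =====
def solve_alt (N : Int) (C : Int) (numbers : List Int) : List Int :=
  let st := numbers.foldl (fun (st : PySem.Dict Int Int × List Int) num =>
    if st.1.contains num then (st.1.insert num (st.1.getD num 0 + 1), st.2)
    else (st.1.insert num 1, st.2 ++ [num])) (PySem.Dict.empty, [])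
  let counts := st.1
  let m := numbers.length
  let buckets := st.2.foldl (fun (bs : List (List Int)) num =>
      bs.set (counts.getD num 0).toNat (bs.getD (counts.getD num 0).toNat [] ++ [num]))
    (List.replicate (m + 1) [])
  (PySem.List.pyRange (m : Int) 0 (-1)).foldl (fun out c =>
    (buckets.getD c.toNat []).foldl (fun out num => out ++ PySem.List.pyRepeat [num] c) out) []

-- ===== PRECONDITION & SPEC =====
def Spec_solve (N : Int) (C : Int) (numbers : List Int) (out : List Int) : Prop := out = solve_alt N C numbers
instance (N : Int) (C : Int) (numbers : List Int) (out : List Int) : Decidable (Spec_solve N C numbers out) := by unfold Spec_solve; infer_instance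

-- ===== CLAIM (what is proved, stated in full; the proofs are below) =====
def Claim_equal_solve : Prop := ∀ (N : Int) (C : Int) (numbers : List Int), Dom_solve N C numbers → Spec_solve N C numbers (solve N C numbers)

-- ===== LEMMAS AND PROOFS =====

-- the distinct values in first-appearance order, and the (Int-valued) multiplicity
def pvKs (numbers : List Int) : List Int := PySem.Set.ofList numbers
def pvCnt (numbers : List Int) (k : Int) : Int := (numbers.count k : Int)

-- A's result_datas list: (count, rank, key) triples in first-appearance (= rank) order
def pvL (numbers : List Int) : List (Int × Int × Int) :=
  (pvKs numbers).zipIdx.map (fun q => (pvCnt numbers q.1, ((q.2 : Int), q.1)))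

-- the frequency-descending rearrangement both programs produce
def pvYs (numbers : List Int) : List (Int × Int × Int) :=
  (PySem.List.pyRange (numbers.length : Int) 0 (-1)).flatMap
    (fun c => (pvL numbers).filter (fun t => t.1 == c))

def pvBefore {α : Type} (k1 k2 : α → Int) (a b : α) : Bool :=
  decide (k1 a < k1 b) || (!decide (k1 b < k1 a) && decide (k2 a < k2 b))

theorem pvBefore_iff {α : Type} (k1 k2 : α → Int) (a b : α) :
    pvBefore k1 k2 a b = true ↔ (k1 a < k1 b ∨ (k1 a ≤ k1 b ∧ k2 a < k2 b)) := by
  simp only [pvBefore, Bool.or_eq_true, Bool.and_eq_true, Bool.not_eq_eq_eq_not,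
    Bool.not_true, decide_eq_false_iff_not, decide_eq_true_eq]
  omega

theorem pvBefore_false_iff {α : Type} (k1 k2 : α → Int) (a b : α) :
    pvBefore k1 k2 a b = false ↔ ¬ (k1 a < k1 b ∨ (k1 a ≤ k1 b ∧ k2 a < k2 b)) := by
  rw [← Bool.not_eq_true, pvBefore_iff k1 k2 a b]

theorem pv_before_asymm {α : Type} (k1 k2 : α → Int) (a b : α)
    (h : pvBefore k1 k2 a b = true) : pvBefore k1 k2 b a = false := by
  rw [pvBefore_iff] at h
  rw [pvBefore_false_iff]
  omega

theorem pv_before_trans {α : Type} (k1 k2 : α → Int) (a b c : α)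
    (hab : pvBefore k1 k2 a b = true) (hbc : pvBefore k1 k2 b c = true) :
    pvBefore k1 k2 a c = true := by
  rw [pvBefore_iff] at hab hbc ⊢
  omega

theorem pv_before_conn {α : Type} (k1 k2 : α → Int) (a b : α)
    (h1 : pvBefore k1 k2 a b = false) (h2 : pvBefore k1 k2 b a = false) : k2 a = k2 b := by
  rw [pvBefore_false_iff] at h1 h2
  omega

theorem pv_insertBy_pw {α : Type} (k1 k2 : α → Int) (x : α) (ys : List α)
    (h : ys.Pairwise (fun a b => pvBefore k1 k2 b a = false)) :
    (PySem.List.insertBy (pvBefore k1 k2) x ys).Pairwise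
      (fun a b => pvBefore k1 k2 b a = false) := by
  induction ys with
  | nil => simp [PySem.List.insertBy]
  | cons y ys ih =>
    rw [List.pairwise_cons] at h
    obtain ⟨h1, h2⟩ := h
    by_cases hb : pvBefore k1 k2 x y = true
    · rw [PySem.List.insertBy, if_pos hb]
      refine List.Pairwise.cons ?_ (List.Pairwise.cons h1 h2)
      intro b hbmem
      rcases List.mem_cons.mp hbmem with rfl | hbys
      · exact pv_before_asymm _ _ _ _ hb
      · by_contra hc
        have hc' : pvBefore k1 k2 b x = true := by
          cases hbx : pvBefore k1 k2 b x
          · exact absurd hbx hc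
          · rfl
        exact absurd (h1 b hbys) (by simp [pv_before_trans _ _ _ _ _ hc' hb])
    · rw [PySem.List.insertBy, if_neg hb]
      refine List.Pairwise.cons ?_ (ih h2)
      intro b hbmem
      rcases (PySem.List.insertBy_mem_iff _ _ _ _).mp hbmem with rfl | hbys
      · simpa using hb
      · exact h1 b hbys

theorem pv_foldl_insertBy_pw {α : Type} (k1 k2 : α → Int) (l : List α) (acc : List α)
    (h : acc.Pairwise (fun a b => pvBefore k1 k2 b a = false)) :
    (l.foldl (fun acc x => PySem.List.insertBy (pvBefore k1 k2) x acc) acc).Pairwise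
      (fun a b => pvBefore k1 k2 b a = false) := by
  induction l generalizing acc with
  | nil => exact h
  | cons x l ih => exact ih _ (pv_insertBy_pw _ _ _ _ h)

theorem pv_sorted2_eq {α : Type} (xs ys : List α) (k1 k2 : α → Int)
    (hperm : ys.Perm xs)
    (hinj : ∀ a ∈ xs, ∀ b ∈ xs, k2 a = k2 b → a = b)
    (hpar : ys.Pairwise (fun a b => pvBefore k1 k2 a b = true)) :
    PySem.List.sorted2 xs k1 k2 = ys := by
  have hdef : PySem.List.sorted2 xs k1 k2
      = xs.foldl (fun acc x => PySem.List.insertBy (pvBefore k1 k2) x acc) [] := rfl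
  have hsp : (PySem.List.sorted2 xs k1 k2).Perm xs := PySem.List.sorted2_perm xs k1 k2 false
  refine List.Perm.eq_of_pairwise (le := fun a b => pvBefore k1 k2 b a = false) ?_ ?_ ?_ (hsp.trans hperm.symm)
  · intro a b ha hb h1 h2
    exact hinj a (hsp.subset ha) b (hperm.subset hb) (pv_before_conn _ _ _ _ h2 h1)
  · rw [hdef]
    exact pv_foldl_insertBy_pw _ _ _ _ (by simp)
  · exact hpar.imp (fun h => pv_before_asymm _ _ _ _ h)

def pvDictA (p : List Int) : PySem.Dict Int (Int × Int) :=
  PySem.Dict.mk ((PySem.Set.ofList p).zipIdx.map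
    (fun q => (q.1, ((p.count q.1 : Int), (q.2 : Int)))))

theorem pvDictA_keys (p : List Int) : (pvDictA p).keys = PySem.Set.ofList p := by
  simp [pvDictA, PySem.Dict.keys, List.map_map]
  exact List.zipIdx_map_fst 0 _

theorem pv_ofList_append_mem (p : List Int) (x : Int) (hx : x ∈ p) :
    PySem.Set.ofList (p ++ [x]) = PySem.Set.ofList p := by
  show List.foldl PySem.Set.add PySem.Set.empty (p ++ [x]) = _
  rw [List.foldl_append]
  simp only [List.foldl_cons, List.foldl_nil]
  have hm : PySem.Set.contains (PySem.Set.ofList p) x = true := by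
    simpa [PySem.Set.contains] using (PySem.Set.mem_ofList p x).mpr hx
  show PySem.Set.add (PySem.Set.ofList p) x = PySem.Set.ofList p
  rw [PySem.Set.add, if_pos hm]

theorem pv_ofList_append_not_mem (p : List Int) (x : Int) (hx : x ∉ p) :
    PySem.Set.ofList (p ++ [x]) = PySem.Set.ofList p ++ [x] := by
  show List.foldl PySem.Set.add PySem.Set.empty (p ++ [x]) = _
  rw [List.foldl_append]
  simp only [List.foldl_cons, List.foldl_nil]
  show PySem.Set.add (PySem.Set.ofList p) x = PySem.Set.ofList p ++ [x]
  rw [PySem.Set.add, if_neg (by simp [PySem.Set.contains]; exact hx)]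

theorem pvA_step (p : List Int) (x : Int) :
    (match (pvDictA p).get? x with
      | some cr => ((pvDictA p).insert x (cr.1 + 1, cr.2), ((PySem.Set.ofList p).length : Int))
      | none => ((pvDictA p).insert x (1, ((PySem.Set.ofList p).length : Int)),
          ((PySem.Set.ofList p).length : Int) + 1))
    = (pvDictA (p ++ [x]), ((PySem.Set.ofList (p ++ [x])).length : Int)) := by
  by_cases hx : x ∈ p
  · -- existing key
    have hks : x ∈ PySem.Set.ofList p := (PySem.Set.mem_ofList p x).mpr hx
    obtain ⟨i, hi, hieq⟩ := List.mem_iff_getElem.mp hks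
    have hizip : ((PySem.Set.ofList p)[i], i) ∈ (PySem.Set.ofList p).zipIdx := by
      have h' : i < (PySem.Set.ofList p).zipIdx.length := by simpa using hi
      have := List.getElem_zipIdx (l := PySem.Set.ofList p) (j := 0) (i := i) h'
      simp only [Nat.zero_add] at this
      exact this ▸ List.getElem_mem h'
    have hitem : (x, ((p.count x : Int), (i : Int))) ∈ (pvDictA p).items := by
      simp only [pvDictA]
      exact List.mem_map.mpr ⟨((PySem.Set.ofList p)[i], i), hizip, by simp [hieq]⟩
    have hnd : (pvDictA p).keys.Nodup := by
      rw [pvDictA_keys]; exact PySem.Set.nodup_ofList p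
    have hget : (pvDictA p).get? x = some ((p.count x : Int), (i : Int)) :=
      PySem.Dict.get?_of_mem_items _ hitem hnd
    rw [hget]
    have hcont : (pvDictA p).contains x = true := by
      rw [PySem.Dict.contains_iff_mem_keys, pvDictA_keys]; exact hks
    have hins := PySem.Dict.items_insert_of_contains (pvDictA p)
      (k := x) (v := ((p.count x : Int) + 1, (i : Int))) hcont
    rw [pv_ofList_append_mem p x hx]
    refine Prod.ext ?_ rfl
    apply PySem.Dict.ext
    show ((pvDictA p).insert x _).items = (pvDictA (p ++ [x])).items
    rw [hins]
    simp only [pvDictA, List.map_map, pv_ofList_append_mem p x hx]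
    apply List.map_congr_left
    intro q hq
    have hq' := List.mem_zipIdx (k := 0) (by simpa using hq : (q.1, q.2) ∈ (PySem.Set.ofList p).zipIdx 0)
    simp only [Nat.zero_add, Nat.sub_zero] at hq'
    by_cases hqx : q.1 = x
    · have hqi : q.2 = i := by
        apply List.Nodup.getElem_inj_iff (PySem.Set.nodup_ofList p) |>.mp
        · rw [← hq'.2.2, hieq, hqx]
      have hcnt : (p ++ [x]).count x = p.count x + 1 := by
        simp [List.count_append]
      simp only [Function.comp, hqx, beq_self_eq_true, if_pos]
      simp [hqx, hqi, hcnt]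
    · have hcnt : (p ++ [x]).count q.1 = p.count q.1 := by
        simp [List.count_append, List.count_singleton]
        omega
      simp only [Function.comp]
      rw [if_neg (by simpa using hqx)]
      simp [hcnt]
  · -- fresh key
    have hks : x ∉ PySem.Set.ofList p := fun h => hx ((PySem.Set.mem_ofList p x).mp h)
    have hget : (pvDictA p).get? x = none := by
      rw [PySem.Dict.get?_eq_none_iff_not_mem_keys, pvDictA_keys]; exact hks
    rw [hget]
    have hcont : (pvDictA p).contains x = false := by
      rw [← Bool.not_eq_true, PySem.Dict.contains_iff_mem_keys, pvDictA_keys]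
      simpa using hks
    have hins := PySem.Dict.items_insert_of_not_contains (pvDictA p)
      (k := x) (v := (1, ((PySem.Set.ofList p).length : Int))) hcont
    have hofl := pv_ofList_append_not_mem p x hx
    refine Prod.ext ?_ ?_
    · apply PySem.Dict.ext
      show ((pvDictA p).insert x _).items = (pvDictA (p ++ [x])).items
      rw [hins]
      simp only [pvDictA, hofl, List.zipIdx_append, List.map_append, Nat.zero_add]
      congr 1
      · apply List.map_congr_left
        intro q hq
        have hq' := List.mem_zipIdx (k := 0) (by simpa using hq : (q.1, q.2) ∈ (PySem.Set.ofList p).zipIdx 0)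
        simp only [Nat.zero_add, Nat.sub_zero] at hq'
        have hqx : q.1 ≠ x := by
          intro h; exact hks (h ▸ (hq'.2.2 ▸ List.getElem_mem hq'.2.1))
        have hcnt : (p ++ [x]).count q.1 = p.count q.1 := by
          simp [List.count_append, List.count_singleton]
          omega
        simp [hcnt]
      · have hp0 : p.count x = 0 := List.count_eq_zero.mpr hx
        simp [hp0]
    · show ((PySem.Set.ofList p).length : Int) + 1 = _
      rw [hofl]
      simp

theorem pvA_loop (l p : List Int) :
    l.foldl (fun (st : PySem.Dict Int (Int × Int) × Int) num =>
      match (st.1).get? num with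
      | some cr => (st.1.insert num (cr.1 + 1, cr.2), st.2)
      | none => (st.1.insert num (1, st.2), st.2 + 1))
      (pvDictA p, ((PySem.Set.ofList p).length : Int))
    = (pvDictA (p ++ l), ((PySem.Set.ofList (p ++ l)).length : Int)) := by
  induction l generalizing p with
  | nil => simp
  | cons x l ih =>
    rw [List.foldl_cons]
    have hstep := pvA_step p x
    calc _ = l.foldl _ (pvDictA (p ++ [x]), ((PySem.Set.ofList (p ++ [x])).length : Int)) := by
          rw [← hstep]
      _ = _ := by rw [ih (p ++ [x])]; simp

theorem pv_partition_perm {α : Type} (cs : List Int) (L : List α) (f : α → Int)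
    (hn : cs.Nodup) (hmem : ∀ t ∈ L, f t ∈ cs) :
    (cs.flatMap (fun c => L.filter (fun t => f t == c))).Perm L := by
  induction cs generalizing L with
  | nil =>
    have : L = [] := by
      cases L with
      | nil => rfl
      | cons a l => exact absurd (hmem a (by simp)) (by simp)
    simp [this]
  | cons c cs ih =>
    rw [List.flatMap_cons]
    have hn' := List.nodup_cons.mp hn
    have htail : cs.flatMap (fun c' => L.filter (fun t => f t == c'))
        = cs.flatMap (fun c' => (L.filter (fun t => !(f t == c))).filter (fun t => f t == c')) := by
      apply List.flatMap_congr
      intro c' hc'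
      rw [List.filter_filter]
      apply List.filter_congr
      intro t _
      by_cases h : f t = c'
      · simp only [h, beq_self_eq_true, Bool.not_true, Bool.true_and, beq_iff_eq,
          Bool.not_eq_eq_eq_not, Bool.and_eq_true, decide_eq_true_eq]
        simp
        exact fun hh => hn'.1 (hh ▸ hc')
      · simp [h]
    rw [htail]
    have ihh := ih (L.filter (fun t => !(f t == c))) hn'.2 (by
      intro t ht
      rw [List.mem_filter] at ht
      have := hmem t ht.1
      rcases List.mem_cons.mp this with h | h
      · exact absurd ht.2 (by simp [h])
      · exact h)
    exact (List.Perm.append_left _ ihh).trans (List.filter_append_perm _ L)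

theorem pv_rangeDesc_mem (M c : Int) (hM : 0 ≤ M) :
    c ∈ PySem.List.pyRange M 0 (-1) ↔ 1 ≤ c ∧ c ≤ M := by
  rw [PySem.List.pyRange_neg_one]
  simp only [List.mem_map, List.mem_range]
  constructor
  · rintro ⟨k, hk, rfl⟩; omega
  · intro h; exact ⟨(M - c).toNat, by omega, by omega⟩

theorem pv_rangeDesc_nodup (M : Int) : (PySem.List.pyRange M 0 (-1)).Nodup := by
  rw [PySem.List.pyRange_neg_one]
  exact List.Nodup.map (fun a b h => by omega) List.nodup_range

theorem pv_rangeDesc_pairwise (M : Int) :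
    (PySem.List.pyRange M 0 (-1)).Pairwise (fun a b => b < a) := by
  rw [PySem.List.pyRange_neg_one]
  rw [List.pairwise_map]
  exact List.Pairwise.imp (fun h => by omega) List.pairwise_lt_range


theorem pv_L_getElem (numbers : List Int) (i : Nat) (h : i < (pvL numbers).length) :
    (pvL numbers)[i] = (pvCnt numbers ((pvKs numbers)[i]'(by simpa [pvL, pvKs] using h)),
      ((i : Int), (pvKs numbers)[i]'(by simpa [pvL, pvKs] using h))) := by
  simp [pvL, pvKs, List.getElem_zipIdx]

theorem pv_L_inj (numbers : List Int) :
    ∀ a ∈ pvL numbers, ∀ b ∈ pvL numbers, a.2.1 = b.2.1 → a = b := by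
  intro a ha b hb hab
  obtain ⟨i, hi, rfl⟩ := List.mem_iff_getElem.mp ha
  obtain ⟨j, hj, rfl⟩ := List.mem_iff_getElem.mp hb
  rw [pv_L_getElem _ _ hi, pv_L_getElem _ _ hj] at hab ⊢
  simp only at hab
  have : i = j := by exact_mod_cast hab
  subst this
  rfl

theorem pv_L_pairwise (numbers : List Int) :
    (pvL numbers).Pairwise (fun a b => a.2.1 < b.2.1) := by
  rw [List.pairwise_iff_getElem]
  intro i j hi hj hij
  rw [pv_L_getElem _ _ hi, pv_L_getElem _ _ hj]
  simp only
  exact_mod_cast hij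

theorem pv_L_mem (numbers : List Int) :
    ∀ t ∈ pvL numbers, t.1 = pvCnt numbers t.2.2 ∧ t.2.2 ∈ numbers := by
  intro t ht
  obtain ⟨q, hq, rfl⟩ := List.mem_map.mp ht
  have hq' := List.mem_zipIdx (k := 0) (by simpa using hq : (q.1, q.2) ∈ (pvKs numbers).zipIdx 0)
  simp only [Nat.zero_add, Nat.sub_zero] at hq'
  refine ⟨rfl, ?_⟩
  show q.1 ∈ numbers
  rw [← PySem.Set.mem_ofList numbers q.1]
  exact hq'.2.2 ▸ List.getElem_mem hq'.2.1

theorem pv_ys_perm (numbers : List Int) : (pvYs numbers).Perm (pvL numbers) := by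
  rw [pvYs]
  refine pv_partition_perm _ (pvL numbers) (fun t : Int × Int × Int => t.1) (pv_rangeDesc_nodup _) ?_
  intro t ht
  obtain ⟨hcnt, hmem⟩ := pv_L_mem numbers t ht
  rw [pv_rangeDesc_mem _ _ (Int.natCast_nonneg _)]
  simp only
  rw [hcnt]
  unfold pvCnt
  have h1 : 0 < numbers.count t.2.2 := List.count_pos_iff.mpr hmem
  have h2 : numbers.count t.2.2 ≤ numbers.length := List.count_le_length
  omega

theorem pv_ys_pairwise (numbers : List Int) :
    (pvYs numbers).Pairwise
      (fun a b => pvBefore (fun x : Int × Int × Int => -x.1) (fun x => x.2.1) a b = true) := by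
  rw [pvYs, List.pairwise_flatMap]
  constructor
  · intro c _
    have hp : ((pvL numbers).filter (fun t => t.1 == c)).Pairwise (fun a b => a.2.1 < b.2.1) :=
      (pv_L_pairwise numbers).filter _
    refine List.Pairwise.imp_of_mem ?_ hp
    intro a b ha hb hlt
    have hac : a.1 = c := by simpa using (List.mem_filter.mp ha).2
    have hbc : b.1 = c := by simpa using (List.mem_filter.mp hb).2
    rw [pvBefore_iff]
    right
    exact ⟨by omega, hlt⟩
  · refine List.Pairwise.imp_of_mem ?_ (pv_rangeDesc_pairwise (numbers.length : Int))
    intro c1 c2 _ _ hlt x hx y hy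
    have hxc : x.1 = c1 := by simpa using (List.mem_filter.mp hx).2
    have hyc : y.1 = c2 := by simpa using (List.mem_filter.mp hy).2
    rw [pvBefore_iff]
    left
    omega

theorem pv_repeat_loop (c num : Int) (acc : List Int) :
    (PySem.List.pyRange 0 c 1).foldl (fun r _ => r ++ [num]) acc
      = acc ++ List.replicate c.toNat num := by
  rw [PySem.List.foldl_append_singleton_eq_map (f := fun _ => num)]
  congr 1
  rw [PySem.List.pyRange_one, List.map_map]
  simp only [Function.comp_def]
  simp [List.map_const']

theorem pvA_eq (N C : Int) (numbers : List Int) :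
    solve N C numbers = (pvYs numbers).flatMap (fun t => List.replicate t.1.toNat t.2.2) := by
  show (PySem.List.sorted2
    ((numbers.foldl (fun (st : PySem.Dict Int (Int × Int) × Int) num =>
      match (st.1).get? num with
      | some cr => (st.1.insert num (cr.1 + 1, cr.2), st.2)
      | none => (st.1.insert num (1, st.2), st.2 + 1)) (PySem.Dict.empty, 0)).1.items.map
        (fun kv => (kv.2.1, kv.2.2, kv.1)))
      (fun x => -x.1) (fun x => x.2.1)).foldl
      (fun rtn t => (PySem.List.pyRange 0 t.1 1).foldl (fun r _ => r ++ [t.2.2]) rtn) [] = _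
  rw [show ((PySem.Dict.empty : PySem.Dict Int (Int × Int)), (0 : Int))
      = (pvDictA [], ((PySem.Set.ofList ([] : List Int)).length : Int)) from rfl]
  rw [pvA_loop numbers []]
  simp only [List.nil_append]
  have hitems : (pvDictA numbers).items.map (fun kv => (kv.2.1, kv.2.2, kv.1)) = pvL numbers := by
    simp only [pvDictA, List.map_map, pvL, pvKs]
    rfl
  rw [hitems]
  rw [pv_sorted2_eq (pvL numbers) (pvYs numbers) _ _ (pv_ys_perm numbers)
    (pv_L_inj numbers) (pv_ys_pairwise numbers)]
  rw [PySem.List.foldl_congr_mem _ _ (fun rtn t => rtn ++ List.replicate t.1.toNat t.2.2) _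
    (by intro acc t _; exact pv_repeat_loop t.1 t.2.2 acc)]
  rw [PySem.List.foldl_append_eq_flatMap]
  simp

def pvCntD (p : List Int) : PySem.Dict Int Int :=
  p.foldl (fun d x => d.insert x (d.getD x 0 + 1)) PySem.Dict.empty

theorem pvB_loop (l p : List Int) :
    l.foldl (fun (st : PySem.Dict Int Int × List Int) num =>
      if st.1.contains num then (st.1.insert num (st.1.getD num 0 + 1), st.2)
      else (st.1.insert num 1, st.2 ++ [num]))
      (pvCntD p, PySem.Set.ofList p)
    = (pvCntD (p ++ l), PySem.Set.ofList (p ++ l)) := by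
  induction l generalizing p with
  | nil => simp
  | cons x l ih =>
    rw [List.foldl_cons]
    have hkeys : (pvCntD p).keys = PySem.Set.ofList p := by
      unfold pvCntD
      rw [PySem.Dict.keys_foldl_insert]
      rfl
    have hdict : pvCntD (p ++ [x]) = (pvCntD p).insert x ((pvCntD p).getD x 0 + 1) := by
      unfold pvCntD
      rw [List.foldl_append]
      rfl
    have hstep : (if (pvCntD p).contains x
          then ((pvCntD p).insert x ((pvCntD p).getD x 0 + 1), PySem.Set.ofList p)
          else ((pvCntD p).insert x 1, PySem.Set.ofList p ++ [x]))
        = (pvCntD (p ++ [x]), PySem.Set.ofList (p ++ [x])) := by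
      by_cases hx : x ∈ p
      · have hcon : (pvCntD p).contains x = true := by
          rw [PySem.Dict.contains_iff_mem_keys, hkeys]
          exact (PySem.Set.mem_ofList p x).mpr hx
        rw [if_pos hcon, pv_ofList_append_mem p x hx, hdict]
      · have hcont : (pvCntD p).contains x = false := by
          rw [← Bool.not_eq_true, PySem.Dict.contains_iff_mem_keys, hkeys]
          simpa [PySem.Set.mem_ofList] using hx
        rw [if_neg (by simp [hcont]), pv_ofList_append_not_mem p x hx, hdict,
          PySem.Dict.getD_of_not_contains _ _ hcont]
        norm_num
    calc _ = l.foldl _ (pvCntD (p ++ [x]), PySem.Set.ofList (p ++ [x])) := by rw [← hstep]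
      _ = _ := by rw [ih (p ++ [x])]; simp

theorem pvB_buckets (numbers : List Int) (q pref : List Int)
    (hq : ∀ x ∈ q, (numbers.count x) ≤ numbers.length) :
    q.foldl (fun (bs : List (List Int)) num =>
        bs.set ((pvCntD numbers).getD num 0).toNat
          (bs.getD ((pvCntD numbers).getD num 0).toNat [] ++ [num]))
      ((List.range (numbers.length + 1)).map
        (fun c => pref.filter (fun k => numbers.count k == c)))
    = (List.range (numbers.length + 1)).map
        (fun c => (pref ++ q).filter (fun k => numbers.count k == c)) := by
  induction q generalizing pref with
  | nil => simp
  | cons x q ih =>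
    rw [List.foldl_cons]
    have hgetD : (pvCntD numbers).getD x 0 = (numbers.count x : Int) := by
      unfold pvCntD
      rw [PySem.Dict.getD_foldl_insert_add_one]
      simp
    have hton : ((pvCntD numbers).getD x 0).toNat = numbers.count x := by
      rw [hgetD]; exact Int.toNat_natCast _
    have hn : numbers.count x < numbers.length + 1 := by
      have := hq x (by simp)
      omega
    have hlen : ((List.range (numbers.length + 1)).map
        (fun c => pref.filter (fun k => numbers.count k == c))).length = numbers.length + 1 := by
      simp
    have hget : ((List.range (numbers.length + 1)).map
          (fun c => pref.filter (fun k => numbers.count k == c))).getD (numbers.count x) []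
        = pref.filter (fun k => numbers.count k == numbers.count x) := by
      rw [List.getD_eq_getElem _ _ (by simpa [hlen] using hn)]
      simp
    have hset : (((List.range (numbers.length + 1)).map
          (fun c => pref.filter (fun k => numbers.count k == c))).set (numbers.count x)
            (pref.filter (fun k => numbers.count k == numbers.count x) ++ [x]))
        = (List.range (numbers.length + 1)).map
          (fun c => (pref ++ [x]).filter (fun k => numbers.count k == c)) := by
      apply List.ext_getElem (by simp)
      intro j h1 h2
      rw [List.getElem_set]
      simp only [List.getElem_map, List.getElem_range]
      have hj : j < numbers.length + 1 := by simpa using h2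
      rw [List.filter_append]
      by_cases hjx : numbers.count x = j
      · rw [if_pos hjx, ← hjx]
        simp
      · rw [if_neg hjx]
        have : (List.filter (fun k => numbers.count k == j) [x]) = [] := by
          simp [hjx]
        rw [this, List.append_nil]
    rw [hton, hget, hset, ih (pref ++ [x]) (fun y hy => hq y (by simp [hy]))]
    simp

theorem pvB_eq (N C : Int) (numbers : List Int) :
    solve_alt N C numbers =
      (PySem.List.pyRange (numbers.length : Int) 0 (-1)).flatMap
        (fun c => ((pvKs numbers).filter (fun k => numbers.count k == c.toNat)).flatMap
          (fun k => List.replicate c.toNat k)) := by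
  simp only [solve_alt]
  rw [show ((PySem.Dict.empty : PySem.Dict Int Int), ([] : List Int))
      = (pvCntD [], PySem.Set.ofList ([] : List Int)) from rfl]
  rw [pvB_loop numbers []]
  simp only [List.nil_append]
  have hbase : List.replicate (numbers.length + 1) ([] : List Int)
      = (List.range (numbers.length + 1)).map
          (fun c => ([] : List Int).filter (fun k => numbers.count k == c)) := by
    simp [List.map_const']
  rw [hbase, pvB_buckets numbers (PySem.Set.ofList numbers) []
    (fun x _ => List.count_le_length)]
  simp only [List.nil_append]
  rw [PySem.List.foldl_congr_mem _ _ (fun out (c : Int) =>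
      out ++ (((List.range (numbers.length + 1)).map
        (fun c => (PySem.Set.ofList numbers).filter (fun k => numbers.count k == c))).getD c.toNat []).flatMap
        (fun num => PySem.List.pyRepeat [num] c)) _
    (by intro acc c _; exact PySem.List.foldl_append_eq_flatMap _ _ _)]
  rw [PySem.List.foldl_append_eq_flatMap]
  simp only [List.nil_append]
  apply List.flatMap_congr
  intro c hc
  rw [pv_rangeDesc_mem _ _ (Int.natCast_nonneg _)] at hc
  have hcn : c.toNat < numbers.length + 1 := by omega
  have hget : ((List.range (numbers.length + 1)).map
        (fun c => (PySem.Set.ofList numbers).filter (fun k => numbers.count k == c))).getD c.toNat []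
      = (PySem.Set.ofList numbers).filter (fun k => numbers.count k == c.toNat) := by
    rw [List.getD_eq_getElem _ _ (by simpa using hcn)]
    simp
  rw [hget]
  apply List.flatMap_congr
  intro k _
  exact PySem.List.pyRepeat_singleton k c

-- ===== VERDICT (by name: the statement is the Claim_ definition above) =====
theorem solve_spec : Claim_equal_solve := by
  intro N C numbers _
  unfold Spec_solve
  rw [pvA_eq, pvB_eq, pvYs, List.flatMap_assoc]
  apply List.flatMap_congr
  intro c hc
  rw [pv_rangeDesc_mem _ _ (Int.natCast_nonneg _)] at hc
  have h1 : (pvL numbers).filter (fun t => t.1 == c)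
      = ((pvKs numbers).zipIdx.filter (fun q => pvCnt numbers q.1 == c)).map
          (fun q => (pvCnt numbers q.1, ((q.2 : Int), q.1))) := by
    rw [pvL, List.filter_map]
    rfl
  rw [h1, List.flatMap_map]
  have h2 : (((pvKs numbers).zipIdx.filter (fun q => pvCnt numbers q.1 == c)).flatMap
        (fun q => List.replicate ((pvCnt numbers q.1, ((q.2 : Int), q.1)).1.toNat)
          (pvCnt numbers q.1, ((q.2 : Int), q.1)).2.2))
      = ((pvKs numbers).zipIdx.filter (fun q => pvCnt numbers q.1 == c)).flatMap
        (fun q => List.replicate c.toNat q.1) := by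
    apply List.flatMap_congr
    intro q hq
    have : pvCnt numbers q.1 = c := by simpa using (List.mem_filter.mp hq).2
    simp [this]
  rw [h2]
  have h3 : ((pvKs numbers).zipIdx.filter (fun q => pvCnt numbers q.1 == c)).flatMap
        (fun q => List.replicate c.toNat q.1)
      = ((((pvKs numbers).zipIdx.filter (fun q => pvCnt numbers q.1 == c)).map Prod.fst).flatMap
        (fun k => List.replicate c.toNat k)) := by
    rw [List.flatMap_map]
  rw [h3]
  have h4 : ((pvKs numbers).zipIdx.filter (fun q => pvCnt numbers q.1 == c)).map Prod.fst
      = (pvKs numbers).filter (fun k => pvCnt numbers k == c) := by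
    have hfm := List.filter_map (f := fun q : Int × Nat => q.1)
      (p := fun k => pvCnt numbers k == c) (l := (pvKs numbers).zipIdx)
    rw [List.zipIdx_map_fst] at hfm
    exact hfm.symm
  rw [h4]
  congr 1
  apply List.filter_congr
  intro k _
  by_cases hk : (numbers.count k : Int) = c
  · have hk' : numbers.count k = c.toNat := by omega
    simp [pvCnt, hk, hk']
    omega
  · have hk' : numbers.count k ≠ c.toNat := by omega
    simp [pvCnt, hk, hk']
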